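-- pv_equiv track=rewrite | github.com/michalhron/AI-futures | dashboard/data_utils.py | compatible_stances_for_visions_union
-- ===== SOURCE A (Python) =====
-- V2A_STANCED: dict[tuple[str, str], str] = {
--     ("Open Horizons, Unstable Ground", "Opening"): "Pioneer",
--     ("Open Horizons, Unstable Ground", "Mobilizing"): "Pioneer",
--     ("Open Horizons, Unstable Ground", "Normalizing"): "Pioneer",
--     ("Open Horizons, Unstable Ground", "Controlling"): "Guardian",
--     ("Empowered but Exposed", "Opening"): "Pioneer",
--     ("Empowered but Exposed", "Mobilizing"): "Builder",
--     ("Empowered but Exposed", "Normalizing"): "Guardian",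
--     ("Empowered but Exposed", "Controlling"): "Guardian",
--     ("Seamless but Concentrated", "Opening"): "Pioneer",
--     ("Seamless but Concentrated", "Mobilizing"): "Builder",
--     ("Seamless but Concentrated", "Normalizing"): "Pioneer",
--     ("Seamless but Concentrated", "Controlling"): "Guardian",
--     ("Transformed or Left Behind", "Opening"): "Pioneer",
--     ("Transformed or Left Behind", "Mobilizing"): "Builder",
--     ("Transformed or Left Behind", "Normalizing"): "Pioneer",
--     ("Transformed or Left Behind", "Controlling"): "Guardian",
--     ("Guided but Fragile", "Opening"): "Pioneer",
--     ("Guided but Fragile", "Mobilizing"): "Guardian",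
--     ("Guided but Fragile", "Normalizing"): "Guardian",
--     ("Guided but Fragile", "Controlling"): "Guardian",
-- }
--
-- def compatible_stances_for_visions_union(visions: list[str]) -> set[str] | None:
--     """Union of stances that appear in the table for any of the given visions."""
--     if not visions:
--         return None
--     out: set[str] = set()
--     for (v, s), _arch in V2A_STANCED.items():
--         if v in visions:
--             out.add(s)
--     return out if out else None
-- ===== SOURCE B (Python) =====
-- # Precomputed grouping of V2A_STANCED: vision -> stances appearing for it (table order).
-- _V2S: dict[str, tuple[str, ...]] = {
--     "Open Horizons, Unstable Ground": ("Opening", "Mobilizing", "Normalizing", "Controlling"),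
--     "Empowered but Exposed": ("Opening", "Mobilizing", "Normalizing", "Controlling"),
--     "Seamless but Concentrated": ("Opening", "Mobilizing", "Normalizing", "Controlling"),
--     "Transformed or Left Behind": ("Opening", "Mobilizing", "Normalizing", "Controlling"),
--     "Guided but Fragile": ("Opening", "Mobilizing", "Normalizing", "Controlling"),
-- }
--
-- def compatible_stances_for_visions_union(visions: list[str]) -> set[str] | None:
--     """Union of stances that appear in the table for any of the given visions."""
--     if not visions:
--         return None
--     out = {s for v in visions for s in _V2S.get(v, ())}
--     return out if out else None
-- ===== Notes on version B (the rewrite author's own statement) =====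
-- stated objective: faster
-- what changed: B replaces A's scan of all 20 table rows (each with a list-membership test on visions) by a precomputed vision-to-stances index and a single set comprehension over the given visions with one dict lookup each; both None guards are kept.
import Mathlib
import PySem

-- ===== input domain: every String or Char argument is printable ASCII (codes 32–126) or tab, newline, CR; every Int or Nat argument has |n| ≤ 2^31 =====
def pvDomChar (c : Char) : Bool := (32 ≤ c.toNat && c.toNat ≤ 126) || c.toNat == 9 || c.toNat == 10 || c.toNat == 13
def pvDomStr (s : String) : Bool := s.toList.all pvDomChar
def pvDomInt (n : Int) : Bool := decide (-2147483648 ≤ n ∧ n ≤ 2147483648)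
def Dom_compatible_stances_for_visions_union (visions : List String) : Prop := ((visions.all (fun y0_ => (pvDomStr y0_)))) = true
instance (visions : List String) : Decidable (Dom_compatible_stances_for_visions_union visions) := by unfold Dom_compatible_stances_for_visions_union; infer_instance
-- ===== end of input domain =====

-- B replaces A's scan of all 20 table rows (each doing a membership test on `visions`)
-- by a precomputed vision→stances index and one set comprehension over `visions`
-- (objective: faster by a constant factor; no per-row membership scans).

-- ===== PORT A =====
-- V2A_STANCED as an association list in insertion order
def pvTable : List ((String × String) × String) :=
  [(("Open Horizons, Unstable Ground", "Opening"), "Pioneer"),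
   (("Open Horizons, Unstable Ground", "Mobilizing"), "Pioneer"),
   (("Open Horizons, Unstable Ground", "Normalizing"), "Pioneer"),
   (("Open Horizons, Unstable Ground", "Controlling"), "Guardian"),
   (("Empowered but Exposed", "Opening"), "Pioneer"),
   (("Empowered but Exposed", "Mobilizing"), "Builder"),
   (("Empowered but Exposed", "Normalizing"), "Guardian"),
   (("Empowered but Exposed", "Controlling"), "Guardian"),
   (("Seamless but Concentrated", "Opening"), "Pioneer"),
   (("Seamless but Concentrated", "Mobilizing"), "Builder"),
   (("Seamless but Concentrated", "Normalizing"), "Pioneer"),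
   (("Seamless but Concentrated", "Controlling"), "Guardian"),
   (("Transformed or Left Behind", "Opening"), "Pioneer"),
   (("Transformed or Left Behind", "Mobilizing"), "Builder"),
   (("Transformed or Left Behind", "Normalizing"), "Pioneer"),
   (("Transformed or Left Behind", "Controlling"), "Guardian"),
   (("Guided but Fragile", "Opening"), "Pioneer"),
   (("Guided but Fragile", "Mobilizing"), "Guardian"),
   (("Guided but Fragile", "Normalizing"), "Guardian"),
   (("Guided but Fragile", "Controlling"), "Guardian")]

def compatible_stances_for_visions_union (visions : List String) : Option (List String) :=
  if visions = [] then none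
  else
    -- for (v, s), _arch in V2A_STANCED.items(): if v in visions: out.add(s)
    let out : PySem.Set String :=
      pvTable.foldl (fun out it => if it.1.1 ∈ visions then PySem.Set.add out it.1.2 else out)
        PySem.Set.empty
    if out = [] then none else some out

-- ===== PORT B =====
-- _V2S: the precomputed vision → stances index, a module-level literal in Source B
def pvV2S : PySem.Dict String (List String) :=
  PySem.Dict.mk
    [("Open Horizons, Unstable Ground", ["Opening", "Mobilizing", "Normalizing", "Controlling"]),
     ("Empowered but Exposed", ["Opening", "Mobilizing", "Normalizing", "Controlling"]),
     ("Seamless but Concentrated", ["Opening", "Mobilizing", "Normalizing", "Controlling"]),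
     ("Transformed or Left Behind", ["Opening", "Mobilizing", "Normalizing", "Controlling"]),
     ("Guided but Fragile", ["Opening", "Mobilizing", "Normalizing", "Controlling"])]

def compatible_stances_for_visions_union_alt (visions : List String) : Option (List String) :=
  if visions = [] then none
  else
    -- out = {s for v in visions for s in _V2S.get(v, ())}
    let out : PySem.Set String :=
      PySem.Set.ofList (visions.flatMap (fun v => pvV2S.getD v []))
    if out = [] then none else some out

-- ===== PRECONDITION & SPEC =====
def Spec_compatible_stances_for_visions_union (visions : List String) (out : Option (List String)) : Prop := out = compatible_stances_for_visions_union_alt visions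
instance (visions : List String) (out : Option (List String)) : Decidable (Spec_compatible_stances_for_visions_union visions out) := by unfold Spec_compatible_stances_for_visions_union; infer_instance

-- ===== CLAIM (what is proved, stated in full; the proofs are below) =====
def Claim_equal_compatible_stances_for_visions_union : Prop := ∀ (visions : List String), Dom_compatible_stances_for_visions_union visions → Spec_compatible_stances_for_visions_union visions (compatible_stances_for_visions_union visions)

-- ===== LEMMAS AND PROOFS =====

-- the five vision keys, and the constant stance list every vision carries
def pvKeys : List String :=
  ["Open Horizons, Unstable Ground", "Empowered but Exposed", "Seamless but Concentrated",
   "Transformed or Left Behind", "Guided but Fragile"]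

def pvOMNC : List String := ["Opening", "Mobilizing", "Normalizing", "Controlling"]

lemma pvV2S_getD (v : String) :
    pvV2S.getD v [] = if v ∈ pvKeys then pvOMNC else [] := by
  by_cases h1 : v = "Open Horizons, Unstable Ground"
  · subst h1; decide
  by_cases h2 : v = "Empowered but Exposed"
  · subst h2; decide
  by_cases h3 : v = "Seamless but Concentrated"
  · subst h3; decide
  by_cases h4 : v = "Transformed or Left Behind"
  · subst h4; decide
  by_cases h5 : v = "Guided but Fragile"
  · subst h5; decide
  · have hk : v ∉ pvKeys := by simp [pvKeys, h1, h2, h3, h4, h5]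
    rw [if_neg hk]
    simp [pvV2S, PySem.Dict.getD, PySem.Dict.get?,
      Ne.symm h1, Ne.symm h2, Ne.symm h3, Ne.symm h4, Ne.symm h5]

lemma addOMNC (L : List String) (h : ∀ x ∈ L, x ∈ pvOMNC) :
    L.foldl PySem.Set.add pvOMNC = pvOMNC := by
  induction L with
  | nil => rfl
  | cons x rest ih =>
      have hx : PySem.Set.add pvOMNC x = pvOMNC := by
        have := h x List.mem_cons_self
        fin_cases this <;> decide
      simp only [List.foldl, hx]
      exact ih (fun y hy => h y (List.mem_cons_of_mem _ hy))

lemma flat_mem (visions : List String) :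
    ∀ x ∈ visions.flatMap (fun v => pvV2S.getD v []), x ∈ pvOMNC := by
  intro x hx
  rcases List.mem_flatMap.mp hx with ⟨v, _, hm⟩
  rw [pvV2S_getD] at hm
  by_cases h : v ∈ pvKeys
  · rwa [if_pos h] at hm
  · rw [if_neg h] at hm; cases hm

lemma foldB (visions : List String) :
    PySem.Set.ofList (visions.flatMap (fun v => pvV2S.getD v []))
      = if ∃ k ∈ pvKeys, k ∈ visions then pvOMNC else [] := by
  induction visions with
  | nil => simp [pvKeys, PySem.Set.ofList]
  | cons v rest ih =>
      have hsplit : (v :: rest).flatMap (fun v => pvV2S.getD v [])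
          = pvV2S.getD v [] ++ rest.flatMap (fun v => pvV2S.getD v []) := by
        simp
      by_cases h : v ∈ pvKeys
      · have hcond : ∃ k ∈ pvKeys, k ∈ v :: rest := ⟨v, h, List.mem_cons_self⟩
        rw [hsplit, pvV2S_getD, if_pos h, if_pos hcond]
        show (pvOMNC ++ _).foldl PySem.Set.add [] = pvOMNC
        rw [List.foldl_append]
        have hpref : pvOMNC.foldl PySem.Set.add ([] : List String) = pvOMNC := by decide
        rw [hpref]
        exact addOMNC _ (flat_mem rest)
      · have hcond : (∃ k ∈ pvKeys, k ∈ v :: rest) ↔ (∃ k ∈ pvKeys, k ∈ rest) := by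
          constructor
          · rintro ⟨k, hk, hm⟩
            rcases List.mem_cons.mp hm with rfl | hm
            · exact absurd hk h
            · exact ⟨k, hk, hm⟩
          · rintro ⟨k, hk, hm⟩; exact ⟨k, hk, List.mem_cons_of_mem _ hm⟩
        rw [hsplit, pvV2S_getD, if_neg h, List.nil_append]
        simp only [hcond]
        exact ih

lemma foldA_eq (visions : List String) :
    pvTable.foldl (fun out it => if it.1.1 ∈ visions then PySem.Set.add out it.1.2 else out)
        PySem.Set.empty
      = if ∃ k ∈ pvKeys, k ∈ visions then pvOMNC else [] := by
  by_cases h1 : "Open Horizons, Unstable Ground" ∈ visions <;>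
  by_cases h2 : "Empowered but Exposed" ∈ visions <;>
  by_cases h3 : "Seamless but Concentrated" ∈ visions <;>
  by_cases h4 : "Transformed or Left Behind" ∈ visions <;>
  by_cases h5 : "Guided but Fragile" ∈ visions <;>
    simp [pvTable, pvKeys, pvOMNC, PySem.Set.add, PySem.Set.empty, h1, h2, h3, h4, h5]

-- ===== VERDICT (by name: the statement is the Claim_ definition above) =====
theorem compatible_stances_for_visions_union_spec : Claim_equal_compatible_stances_for_visions_union := by
  intro visions _
  unfold Spec_compatible_stances_for_visions_union
  unfold compatible_stances_for_visions_union compatible_stances_for_visions_union_alt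
  by_cases hv : visions = []
  · simp [hv]
  · simp only [if_neg hv, foldA_eq, foldB]
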